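-- pv_equiv track=rewrite | github.com/instadeepai/SKAInnotate | core/backend/app/utils.py | get_final_annotation
-- ===== SOURCE A (Python) =====
-- from collections import Counter
-- from typing import List, Optional, Any
--
-- def get_final_annotation(annotations: List[str], review: Optional[str]) -> Any:
--   if review is not None:
--     return review
--
--   if annotations:
--     annotation_counts = Counter(annotations)
--     max_count = max(annotation_counts.values())
--     majority_annotations = [annotation for annotation, count in annotation_counts.items() if count == max_count]
--
--     if len(majority_annotations) > 1:
--       return None
--     return majority_annotations[0]
--
--   return None
-- ===== SOURCE B (Python) =====
-- def get_final_annotation(annotations, review):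
--   if review is not None:
--     return review
--   if not annotations:
--     return None
--   s = sorted(annotations)
--   best = None
--   best_len = 0
--   tie = False
--   i = 0
--   n = len(s)
--   while i < n:
--     j = i + 1
--     while j < n and s[j] == s[i]:
--       j += 1
--     run = j - i
--     if run > best_len:
--       best, best_len, tie = s[i], run, False
--     elif run == best_len:
--       tie = True
--     i = j
--   return None if tie else best
-- ===== Notes on version B (the rewrite author's own statement) =====
-- stated objective: alternative
-- what changed: Replaces Counter/max/filter over a hash map by sorting a copy of the list and scanning it once, grouping equal consecutive elements into runs while tracking the longest run and whether it is tied.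
import Mathlib
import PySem

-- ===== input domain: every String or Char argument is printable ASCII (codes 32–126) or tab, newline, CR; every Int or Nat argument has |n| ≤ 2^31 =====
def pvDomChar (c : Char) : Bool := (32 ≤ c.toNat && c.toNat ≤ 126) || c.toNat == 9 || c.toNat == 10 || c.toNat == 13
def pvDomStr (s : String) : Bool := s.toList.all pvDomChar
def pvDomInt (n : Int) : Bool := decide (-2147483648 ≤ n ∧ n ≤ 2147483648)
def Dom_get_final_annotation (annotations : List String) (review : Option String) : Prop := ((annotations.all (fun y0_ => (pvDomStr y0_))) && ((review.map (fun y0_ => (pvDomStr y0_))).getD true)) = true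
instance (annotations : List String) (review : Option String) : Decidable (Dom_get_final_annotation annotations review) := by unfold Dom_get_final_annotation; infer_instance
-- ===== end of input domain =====

-- B replaces A's Counter/max/filter by a sort-then-group single scan (objective: alternative, same result).

-- ===== PORT A =====
def get_final_annotation (annotations : List String) (review : Option String) : Option String :=
  match review with
  | some r => some r
  | none =>
    if annotations.isEmpty then none
    else
      let annotation_counts := PySem.Dict.counter annotations
      match PySem.List.max? annotation_counts.values (fun y => y) with
      | none => none  -- unreachable: values is nonempty here (max() would raise on empty)
      | some max_count =>
        let majority_annotations :=
          (annotation_counts.items.filter (fun kv => kv.2 == max_count)).map (fun kv => kv.1)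
        if majority_annotations.length > 1 then none
        else PySem.List.pyGet? majority_annotations 0

-- ===== PORT B =====
-- the outer while-loop of Source B: one grouping pass over the sorted list, carrying
-- (best, best_len, tie); the inner while-loop advancing j is takeWhile/dropWhile
def pvRunScan : List String → Option String → Int → Bool → Option String
  | [], best, _, tie => if tie then none else best
  | x :: rest, best, best_len, tie =>
    let run : Int := 1 + (rest.takeWhile (fun y => y == x)).length
    let rest' := rest.dropWhile (fun y => y == x)
    if run > best_len then pvRunScan rest' (some x) run false
    else if run == best_len then pvRunScan rest' best best_len true
    else pvRunScan rest' best best_len tie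
termination_by s _ _ _ => s.length
decreasing_by
  all_goals
    simp only [List.length_cons]
    exact Nat.lt_succ_of_le (List.length_dropWhile_le _ _)

def get_final_annotation_alt (annotations : List String) (review : Option String) : Option String :=
  match review with
  | some r => some r
  | none =>
    if annotations.isEmpty then none
    else pvRunScan (PySem.List.sorted annotations (fun x => x) false) none 0 false

-- ===== PRECONDITION & SPEC =====
def Spec_get_final_annotation (annotations : List String) (review : Option String) (out : Option String) : Prop := out = get_final_annotation_alt annotations review
instance (annotations : List String) (review : Option String) (out : Option String) : Decidable (Spec_get_final_annotation annotations review out) := by unfold Spec_get_final_annotation; infer_instance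

-- ===== CLAIM (what is proved, stated in full; the proofs are below) =====
def Claim_equal_get_final_annotation : Prop := ∀ (annotations : List String) (review : Option String), Dom_get_final_annotation annotations review → Spec_get_final_annotation annotations review (get_final_annotation annotations review)

-- ===== LEMMAS AND PROOFS =====

-- the runs of the sorted list as (value, run length) pairs, following pvRunScan's traversal
def pvGroups : List String → List (String × Int)
  | [] => []
  | x :: rest =>
    (x, 1 + ((rest.takeWhile (fun y => y == x)).length : Int)) :: pvGroups (rest.dropWhile (fun y => y == x))
termination_by s => s.length
decreasing_by
  simp only [List.length_cons]
  exact Nat.lt_succ_of_le (List.length_dropWhile_le _ _)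

-- pvRunScan's state transition for one run
def pvStep : (Option String × Int × Bool) → (String × Int) → (Option String × Int × Bool) :=
  fun st p =>
    if p.2 > st.2.1 then (some p.1, p.2, false)
    else if p.2 == st.2.1 then (st.1, st.2.1, true)
    else st

def pvFinish : (Option String × Int × Bool) → Option String :=
  fun st => if st.2.2 then none else st.1

def pvMaxC : List (String × Int) → Int
  | [] => 0
  | p :: G => max p.2 (pvMaxC G)

theorem le_pvMaxC (G : List (String × Int)) (p : String × Int) (h : p ∈ G) : p.2 ≤ pvMaxC G := by
  induction G with
  | nil => cases h
  | cons q G ih =>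
    rcases List.mem_cons.mp h with rfl | h
    · exact le_max_left _ _
    · exact le_trans (ih h) (le_max_right _ _)

theorem pvMaxC_attained (G : List (String × Int)) (h1 : ∀ p ∈ G, 1 ≤ p.2) (hne : G ≠ []) :
    ∃ q ∈ G, q.2 = pvMaxC G := by
  induction G with
  | nil => exact absurd rfl hne
  | cons p G ih =>
    by_cases hG : G = []
    · subst hG
      refine ⟨p, List.mem_cons_self, ?_⟩
      simp only [pvMaxC]
      have := h1 p List.mem_cons_self
      omega
    · obtain ⟨q, hq, hq2⟩ := ih (fun r hr => h1 r (List.mem_cons_of_mem _ hr)) hG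
      rcases le_total p.2 (pvMaxC G) with hle | hle
      · exact ⟨q, List.mem_cons_of_mem _ hq, by simp only [pvMaxC]; omega⟩
      · exact ⟨p, List.mem_cons_self, by simp only [pvMaxC]; omega⟩

theorem pvMaxC_append (G : List (String × Int)) (p : String × Int) :
    pvMaxC (G ++ [p]) = max (pvMaxC G) p.2 := by
  induction G with
  | nil => simp only [List.nil_append, pvMaxC]; omega
  | cons q G ih =>
    simp only [List.cons_append, pvMaxC, ih]
    omega

theorem pvMaxC_perm {G1 G2 : List (String × Int)} (h : G1.Perm G2) : pvMaxC G1 = pvMaxC G2 := by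
  induction h with
  | nil => rfl
  | cons x _ ih => simp [pvMaxC, ih]
  | swap x y l => simp only [pvMaxC]; omega
  | trans _ _ ih1 ih2 => exact ih1.trans ih2

theorem pvRunScan_eq_fold (s : List String) : ∀ (b : Option String) (l : Int) (t : Bool),
    pvRunScan s b l t = pvFinish ((pvGroups s).foldl pvStep (b, l, t)) := by
  induction s using pvGroups.induct with
  | case1 =>
    intro b l t
    rw [pvRunScan, pvGroups]
    simp [pvFinish]
  | case2 x rest ih =>
    intro b l t
    rw [pvRunScan, pvGroups]
    simp only [List.foldl_cons, pvStep]
    split_ifs <;> exact ih _ _ _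

theorem pvFold_spec (G : List (String × Int)) (h1 : ∀ p ∈ G, 1 ≤ p.2) :
    G.foldl pvStep (none, 0, false) =
      ((G.find? (fun p => p.2 == pvMaxC G)).map (fun p => p.1), pvMaxC G,
        decide (2 ≤ G.countP (fun p => p.2 == pvMaxC G))) := by
  induction G using List.reverseRecOn with
  | nil => simp [pvMaxC]
  | append_singleton G p ih =>
    have h1G : ∀ q ∈ G, 1 ≤ q.2 := fun q hq => h1 q (by simp [hq])
    have hp1 : 1 ≤ p.2 := h1 p (by simp)
    rw [List.foldl_append, List.foldl_cons, List.foldl_nil, ih h1G, pvMaxC_append]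
    rcases lt_trichotomy (pvMaxC G) p.2 with hlt | heq | hgt
    · -- new strict maximum
      have hmax : max (pvMaxC G) p.2 = p.2 := max_eq_right hlt.le
      have hnone : G.find? (fun q => q.2 == p.2) = none :=
        List.find?_eq_none.mpr (fun q hq => by
          have := le_pvMaxC G q hq
          simp only [beq_iff_eq]; omega)
      have hcount : G.countP (fun q => q.2 == p.2) = 0 :=
        List.countP_eq_zero.mpr (fun q hq => by
          have := le_pvMaxC G q hq
          simp only [beq_iff_eq]; omega)
      rw [hmax]
      simp only [pvStep, gt_iff_lt, beq_iff_eq]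
      rw [if_pos hlt, List.find?_append, hnone, List.countP_append, hcount]
      simp
    · -- ties the maximum
      have hMpos : 1 ≤ pvMaxC G := heq ▸ hp1
      have hGne : G ≠ [] := by
        intro h; subst h; simp [pvMaxC] at hMpos
      obtain ⟨q, hqG, hq2⟩ := pvMaxC_attained G h1G hGne
      have hmax : max (pvMaxC G) p.2 = pvMaxC G := by omega
      obtain ⟨r, hr⟩ : ∃ r, G.find? (fun q => q.2 == pvMaxC G) = some r := by
        cases h : G.find? (fun q => q.2 == pvMaxC G) with
        | none => exact absurd (List.find?_eq_none.mp h q hqG) (by simp [hq2])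
        | some r => exact ⟨r, rfl⟩
      have hcpos : 1 ≤ G.countP (fun q => q.2 == pvMaxC G) :=
        List.countP_pos_iff.mpr ⟨q, hqG, by simp [hq2]⟩
      rw [hmax]
      simp only [pvStep, gt_iff_lt, beq_iff_eq]
      rw [if_neg (by omega), if_pos heq.symm, List.find?_append, hr, List.countP_append]
      have hc1 : List.countP (fun q => q.2 == pvMaxC G) [p] = 1 := by simp [heq]
      rw [hc1, Option.some_or]
      have hdec : decide (2 ≤ List.countP (fun q => q.2 == pvMaxC G) G + 1) = true := by
        simp only [decide_eq_true_eq]; omega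
      rw [hdec]
    · -- below the maximum
      have hMpos : 1 ≤ pvMaxC G := by omega
      have hGne : G ≠ [] := by
        intro h; subst h; simp [pvMaxC] at hMpos
      obtain ⟨q, hqG, hq2⟩ := pvMaxC_attained G h1G hGne
      have hmax : max (pvMaxC G) p.2 = pvMaxC G := by omega
      obtain ⟨r, hr⟩ : ∃ r, G.find? (fun q => q.2 == pvMaxC G) = some r := by
        cases h : G.find? (fun q => q.2 == pvMaxC G) with
        | none => exact absurd (List.find?_eq_none.mp h q hqG) (by simp [hq2])
        | some r => exact ⟨r, rfl⟩
      rw [hmax]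
      simp only [pvStep, gt_iff_lt, beq_iff_eq]
      rw [if_neg (by omega), if_neg (by omega), List.find?_append, hr, List.countP_append]
      simp only [List.countP_cons, List.countP_nil, beq_iff_eq, Option.some_or]
      rw [if_neg (by omega)]
      simp

theorem pvGroups_spec (s : List String) (hs : s.Pairwise (· ≤ ·)) :
    (∀ p ∈ pvGroups s, p.2 = (s.count p.1 : Int)) ∧
    ((pvGroups s).map Prod.fst).Nodup ∧
    (∀ v, v ∈ (pvGroups s).map Prod.fst ↔ v ∈ s) := by
  induction s using pvGroups.induct with
  | case1 => simp [pvGroups]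
  | case2 x rest ih =>
    rw [List.pairwise_cons] at hs
    obtain ⟨hx, hrest⟩ := hs
    have hdr_sorted : (rest.dropWhile (fun y => y == x)).Pairwise (· ≤ ·) :=
      hrest.sublist (List.dropWhile_sublist _)
    have htk_eq : ∀ y ∈ rest.takeWhile (fun y => y == x), y = x :=
      fun y hy => by
        have h := List.mem_takeWhile_imp (l := rest) (p := fun y => y == x) hy
        exact eq_of_beq h
    have hdr_gt : ∀ w ∈ rest.dropWhile (fun y => y == x), x < w := by
      cases hdr : rest.dropWhile (fun y => y == x) with
      | nil => simp
      | cons z t =>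
        have hz_ne : ¬ (z == x) = true := by
          have := List.head?_dropWhile_not (fun y => y == x) rest
          rw [hdr] at this; simpa using this
        have hz_mem : z ∈ rest :=
          (List.dropWhile_sublist _).subset (hdr ▸ List.mem_cons_self)
        have hxz : x < z := lt_of_le_of_ne (hx z hz_mem) (by intro h; subst h; exact hz_ne (beq_self_eq_true x))
        intro w hw
        rcases List.mem_cons.mp hw with rfl | hwt
        · exact hxz
        · have hzw : z ≤ w := by
            rw [hdr, List.pairwise_cons] at hdr_sorted
            exact hdr_sorted.1 w hwt
          exact lt_of_lt_of_le hxz hzw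
    obtain ⟨ih1, ih2, ih3⟩ := ih hdr_sorted
    have hx_not_dr : x ∉ rest.dropWhile (fun y => y == x) :=
      fun h => absurd (hdr_gt x h) (lt_irrefl x)
    have hsplit : ∀ v : String,
        rest.count v = (rest.takeWhile (fun y => y == x)).count v
          + (rest.dropWhile (fun y => y == x)).count v := by
      intro v
      conv_lhs => rw [← List.takeWhile_append_dropWhile (p := fun y => y == x) (l := rest)]
      rw [List.count_append]
    have hcount_x : (x :: rest).count x = (rest.takeWhile (fun y => y == x)).length + 1 := by
      rw [List.count_cons_self, hsplit x,
        List.count_eq_length.mpr (fun y hy => (htk_eq y hy).symm),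
        List.count_eq_zero.mpr hx_not_dr]
    have hcount_keep : ∀ v ∈ rest.dropWhile (fun y => y == x),
        (x :: rest).count v = (rest.dropWhile (fun y => y == x)).count v := by
      intro v hv
      have hvx : x < v := hdr_gt v hv
      have hvne : v ≠ x := by intro h; rw [h] at hvx; exact lt_irrefl x hvx
      rw [List.count_cons, hsplit v,
        List.count_eq_zero.mpr (fun h => hvne (htk_eq v h))]
      simp [Ne.symm hvne]
    rw [pvGroups]
    refine ⟨?_, ?_, ?_⟩
    · intro p hp
      rcases List.mem_cons.mp hp with rfl | hp
      · simp only [hcount_x]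
        push_cast
        ring
      · have hmem : p.1 ∈ rest.dropWhile (fun y => y == x) :=
          ih3 p.1 |>.mp (List.mem_map.mpr ⟨p, hp, rfl⟩)
        rw [ih1 p hp, hcount_keep p.1 hmem]
    · simp only [List.map_cons, List.nodup_cons]
      exact ⟨fun h => hx_not_dr ((ih3 x).mp h), ih2⟩
    · intro v
      simp only [List.map_cons, List.mem_cons, ih3]
      constructor
      · rintro (rfl | h)
        · exact Or.inl rfl
        · exact Or.inr ((List.dropWhile_sublist _).subset h)
      · rintro (rfl | h)
        · exact Or.inl rfl
        · by_cases hdr : v ∈ rest.dropWhile (fun y => y == x)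
          · exact Or.inr hdr
          · have hsplit2 := List.takeWhile_append_dropWhile (p := fun y => y == x) (l := rest)
            rw [← hsplit2, List.mem_append] at h
            rcases h with h | h
            · exact Or.inl (htk_eq v h)
            · exact Or.inr h

-- ===== VERDICT (by name: the statement is the Claim_ definition above) =====
theorem get_final_annotation_spec : Claim_equal_get_final_annotation := by
  intro annotations review _hdom
  unfold Spec_get_final_annotation
  cases review with
  | some r => rfl
  | none =>
    by_cases hemp : annotations.isEmpty
    · simp [get_final_annotation, get_final_annotation_alt, hemp]
    · have hne : annotations ≠ [] := by simpa [List.isEmpty_iff] using hemp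
      set GA : List (String × Int) :=
        (PySem.Set.ofList annotations).map (fun k => (k, (annotations.count k : Int))) with hGA
      set s : List String := PySem.List.sorted annotations (fun x => x) false with hsdef
      set GB : List (String × Int) := pvGroups s with hGB
      -- basic facts
      have hsp : s.Pairwise (· ≤ ·) := PySem.List.sorted_pairwise annotations (fun x => x)
      have hperm_s : s.Perm annotations := PySem.List.sorted_perm annotations (fun x => x) false
      obtain ⟨g1, g2, g3⟩ := pvGroups_spec s hsp
      have h1A : ∀ p ∈ GA, 1 ≤ p.2 := by
        intro p hp
        obtain ⟨k, hk, rfl⟩ := List.mem_map.mp hp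
        have hk2 : k ∈ annotations := (PySem.Set.mem_ofList annotations k).mp hk
        have := List.count_pos_iff.mpr hk2
        simpa using this
      have hGcnt : ∀ p ∈ GB, p.2 = (annotations.count p.1 : Int) := fun p hp => by
        rw [g1 p hp, hperm_s.count_eq]
      have h1B : ∀ p ∈ GB, 1 ≤ p.2 := by
        intro p hp
        have hps : p.1 ∈ s := (g3 p.1).mp (List.mem_map.mpr ⟨p, hp, rfl⟩)
        have hpa : p.1 ∈ annotations := hperm_s.subset hps
        have := List.count_pos_iff.mpr hpa
        rw [hGcnt p hp]
        exact_mod_cast this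
      have hGAne : GA ≠ [] := by
        obtain ⟨a, ha⟩ := List.exists_mem_of_ne_nil annotations hne
        have ha' : a ∈ PySem.Set.ofList annotations := (PySem.Set.mem_ofList annotations a).mpr ha
        intro h
        rw [hGA] at h
        rw [List.map_eq_nil_iff.mp h] at ha'
        exact List.not_mem_nil ha'
      -- GA and GB are permutations of each other
      have hGB_eq : GB = (GB.map Prod.fst).map (fun k => (k, (annotations.count k : Int))) := by
        rw [List.map_map]
        have h := List.map_congr_left (l := GB)
          (f := (fun k => (k, (annotations.count k : Int))) ∘ Prod.fst) (g := id)
          (fun p hp => Prod.ext rfl (hGcnt p hp).symm)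
        rw [h, List.map_id]
      have hperm_keys : (PySem.Set.ofList annotations).Perm (GB.map Prod.fst) :=
        (List.perm_ext_iff_of_nodup (PySem.Set.nodup_ofList annotations) g2).mpr
          (fun v => by
            rw [PySem.Set.mem_ofList, g3 v, hperm_s.mem_iff])
      have hperm : GA.Perm GB := by
        rw [hGA]
        conv_rhs => rw [hGB_eq]
        exact hperm_keys.map _
      have hM : pvMaxC GA = pvMaxC GB := pvMaxC_perm hperm
      -- A's max? call returns pvMaxC GA
      have hitems : (PySem.Dict.counter annotations).items = GA :=
        PySem.Dict.items_counter annotations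
      have hvalne : (PySem.Dict.counter annotations).values = GA.map Prod.snd := by
        simp [PySem.Dict.values, hitems]
      have hvne : (PySem.Dict.counter annotations).values ≠ [] := by
        rw [hvalne]
        intro h
        exact hGAne (List.map_eq_nil_iff.mp h)
      obtain ⟨m, hm⟩ : ∃ m, PySem.List.max? (PySem.Dict.counter annotations).values (fun y => y)
          = some m := by
        cases h : PySem.List.max? (PySem.Dict.counter annotations).values (fun y => y) with
        | none => exact absurd ((PySem.List.max?_eq_none_iff _ _).mp h) hvne
        | some m => exact ⟨m, rfl⟩
      have hmmem : m ∈ (PySem.Dict.counter annotations).values := PySem.List.max?_mem hm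
      have hmmax : ∀ y ∈ (PySem.Dict.counter annotations).values, y ≤ m :=
        PySem.List.max?_isMax hm
      have hmM : m = pvMaxC GA := by
        refine le_antisymm ?_ ?_
        · rw [hvalne] at hmmem
          obtain ⟨q, hq, hq2⟩ := List.mem_map.mp hmmem
          exact hq2 ▸ le_pvMaxC GA q hq
        · obtain ⟨q, hq, hq2⟩ := pvMaxC_attained GA h1A hGAne
          rw [← hq2]
          exact hmmax q.2 (by rw [hvalne]; exact List.mem_map.mpr ⟨q, hq, rfl⟩)
      -- evaluate both sides
      have hA : get_final_annotation annotations none =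
          (if ((GA.filter (fun kv => kv.2 == pvMaxC GA)).map (fun kv => kv.1)).length > 1 then none
           else PySem.List.pyGet? ((GA.filter (fun kv => kv.2 == pvMaxC GA)).map (fun kv => kv.1)) 0) := by
        rw [get_final_annotation]
        simp only [hemp, Bool.false_eq_true, if_false, hm, hitems, hmM]
      have hB : get_final_annotation_alt annotations none =
          (if decide (2 ≤ GB.countP (fun p => p.2 == pvMaxC GB)) then none
           else (GB.find? (fun p => p.2 == pvMaxC GB)).map (fun p => p.1)) := by
        rw [get_final_annotation_alt]
        simp only [hemp, Bool.false_eq_true, if_false]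
        rw [← hsdef, pvRunScan_eq_fold, ← hGB, pvFold_spec GB h1B, pvFinish]
      rw [hA, hB]
      -- the two counts agree
      have hcP : GA.countP (fun p => p.2 == pvMaxC GA) = GB.countP (fun p => p.2 == pvMaxC GB) := by
        rw [hM]
        exact hperm.countP_eq _
      have hlenA : ((GA.filter (fun kv => kv.2 == pvMaxC GA)).map (fun kv => kv.1)).length
          = GA.countP (fun p => p.2 == pvMaxC GA) := by
        rw [List.length_map, List.countP_eq_length_filter]
      by_cases hbig : 2 ≤ GB.countP (fun p => p.2 == pvMaxC GB)
      · rw [if_pos (by omega), if_pos (by simpa using hbig)]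
      · -- the maximum is attained exactly once
        have hcpos : 1 ≤ GA.countP (fun p => p.2 == pvMaxC GA) := by
          obtain ⟨q, hq, hq2⟩ := pvMaxC_attained GA h1A hGAne
          exact List.countP_pos_iff.mpr ⟨q, hq, by simp [hq2]⟩
        have hone : GA.countP (fun p => p.2 == pvMaxC GA) = 1 := by omega
        obtain ⟨a, hfa⟩ := List.length_eq_one_iff.mp
          (by rw [List.countP_eq_length_filter] at hone; exact hone :
            (GA.filter (fun p => p.2 == pvMaxC GA)).length = 1)
        have hfb : GB.filter (fun p => p.2 == pvMaxC GB) = [a] := by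
          have hpf : (GA.filter (fun p => p.2 == pvMaxC GA)).Perm
              (GB.filter (fun p => p.2 == pvMaxC GB)) := by
            rw [hM]
            exact hperm.filter _
          rw [hfa] at hpf
          exact (List.perm_singleton.mp hpf.symm)
        rw [if_neg (by omega), if_neg (by simpa using hbig)]
        rw [hfa]
        have hfind : GB.find? (fun p => p.2 == pvMaxC GB) = some a := by
          rw [← List.head?_filter, hfb]
          rfl
        rw [hfind]
        simp
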